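-- pv_equiv track=rewrite | github.com/Washiil/InterviewSolutions | 6kyu/Count_the_photos!.py | count_photos
-- ===== SOURCE A (Python) =====
-- def count_photos(road):
--     pictures = 0
--     for i, val in enumerate(road):
--         if val == '>':
--             pictures += road[i:].count('.')
--         elif val == '<':
--             pictures += road[:i].count('.')
--     return pictures
-- ===== SOURCE B (Python) =====
-- def count_photos(road):
--     total = road.count('.')
--     pictures = 0
--     prefix = 0
--     for ch in road:
--         if ch == '>':
--             pictures += total - prefix
--         elif ch == '<':
--             pictures += prefix
--         elif ch == '.':
--             prefix += 1
--     return pictures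
-- ===== Notes on version B (the rewrite author's own statement) =====
-- stated objective: alternative
-- what changed: Replaces the per-arrow slice-and-count scans with a single pass that maintains a running count of dots seen so far, using total minus prefix for right-pointing cameras; asymptotically O(n) vs A's O(n*arrows), though A's C-level str.count makes measured times comparable.
import Mathlib
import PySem

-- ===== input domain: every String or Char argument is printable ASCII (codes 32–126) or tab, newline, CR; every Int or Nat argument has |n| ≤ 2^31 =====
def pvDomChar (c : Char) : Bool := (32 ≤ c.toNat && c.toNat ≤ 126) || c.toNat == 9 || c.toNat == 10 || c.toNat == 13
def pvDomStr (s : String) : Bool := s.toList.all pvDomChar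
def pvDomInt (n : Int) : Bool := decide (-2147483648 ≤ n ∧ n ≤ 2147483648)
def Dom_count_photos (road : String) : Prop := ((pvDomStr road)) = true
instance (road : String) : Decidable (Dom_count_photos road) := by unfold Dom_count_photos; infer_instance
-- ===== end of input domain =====

-- B replaces A's per-arrow slice-and-count with a single pass keeping a running dot-prefix count (objective: alternative single-pass algorithm).


-- ===== PORT A =====
-- for i, val in enumerate(road): '>' adds road[i:].count('.'), '<' adds road[:i].count('.')
def count_photos (road : String) : Int :=
  (PySem.List.enumerate road.toList 0).foldl
    (fun pictures iv =>
      if iv.2 = '>' then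
        pictures + (PySem.Chars.count (PySem.Chars.slice road.toList (some iv.1) none) ['.'] : Int)
      else if iv.2 = '<' then
        pictures + (PySem.Chars.count (PySem.Chars.slice road.toList none (some iv.1)) ['.'] : Int)
      else pictures) 0

-- ===== PORT B =====
-- total = road.count('.'); one pass with a running prefix count of dots
def count_photos_alt (road : String) : Int :=
  let total : Int := (PySem.Chars.count road.toList ['.'] : Int)
  (road.toList.foldl
    (fun (st : Int × Int) ch =>
      if ch = '>' then (st.1 + (total - st.2), st.2)
      else if ch = '<' then (st.1 + st.2, st.2)
      else if ch = '.' then (st.1, st.2 + 1)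
      else st) ((0 : Int), (0 : Int))).1

-- ===== PRECONDITION & SPEC =====
def Spec_count_photos (road : String) (out : Int) : Prop := out = count_photos_alt road
instance (road : String) (out : Int) : Decidable (Spec_count_photos road out) := by unfold Spec_count_photos; infer_instance

-- ===== CLAIM (what is proved, stated in full; the proofs are below) =====
def Claim_equal_count_photos : Prop := ∀ (road : String), Dom_count_photos road → Spec_count_photos road (count_photos road)

-- ===== LEMMAS AND PROOFS =====

theorem count_go_singleton (c : Char) : ∀ (l : List Char) (fuel acc : Nat), l.length ≤ fuel →
    PySem.Chars.count.go [c] fuel l acc = acc + l.count c := by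
  intro l
  induction l with
  | nil => intro fuel acc h; cases fuel <;> simp [PySem.Chars.count.go]
  | cons x t ih =>
    intro fuel acc h
    cases fuel with
    | zero => simp at h
    | succ f =>
      simp only [PySem.Chars.count.go]
      by_cases hx : x = c
      · subst hx
        simp [List.isPrefixOf, ih f (acc+1) (by simpa using h)]
        omega
      · have hp : ([c].isPrefixOf (x :: t)) = false := by
          simp [List.isPrefixOf]; intro hh; exact hx hh.symm
        simp [hp, ih f acc (by simpa using Nat.le_of_succ_le_succ h), hx]

-- Python s.count(c) for a single char equals the elementwise count
theorem chars_count_singleton (s : List Char) (c : Char) :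
    PySem.Chars.count s [c] = s.count c := by
  simp [PySem.Chars.count, count_go_singleton c s s.length 0 le_rfl]

-- loop invariant: mid-list, A's enumerate-fold equals B's prefix-count fold
theorem loop_eq (L : List Char) :
    ∀ (r t : List Char), L = t ++ r → ∀ p : Int,
    (PySem.List.enumerate r (t.length : Int)).foldl
      (fun pictures iv =>
        if iv.2 = '>' then pictures + ((PySem.List.slice L (some iv.1) none).count '.' : Int)
        else if iv.2 = '<' then pictures + ((PySem.List.slice L none (some iv.1)).count '.' : Int)
        else pictures) p
    = (r.foldl
        (fun (st : Int × Int) ch =>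
          if ch = '>' then (st.1 + ((L.count '.' : Int) - st.2), st.2)
          else if ch = '<' then (st.1 + st.2, st.2)
          else if ch = '.' then (st.1, st.2 + 1) else st)
        (p, (t.count '.' : Int))).1 := by
  intro r
  induction r with
  | nil => intro t hL p; simp [PySem.List.enumerate]
  | cons c r' ih =>
    intro t hL p
    rw [PySem.List.enumerate_cons]
    have hdrop : PySem.List.slice L (some (t.length : Int)) none = c :: r' := by
      rw [PySem.List.slice_from_natCast, hL]
      simp
    have htake : PySem.List.slice L none (some (t.length : Int)) = t := by
      rw [PySem.List.slice_to_natCast, hL]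
      simp
    have hcnt : L.count '.' = t.count '.' + (c :: r').count '.' := by
      rw [hL, List.count_append]
    simp only [List.foldl_cons, hdrop, htake]
    have hL' : L = (t ++ [c]) ++ r' := by simp [hL]
    have hlen : ((t ++ [c]).length : Int) = (t.length : Int) + 1 := by
      simp
    by_cases hgt : c = '>'
    · subst hgt
      have hc1 : (('>' :: r').count '.') = r'.count '.' := by simp
      have hc2 : ((t ++ ['>']).count '.') = t.count '.' := by simp [List.count_append]
      have key := ih (t ++ ['>']) hL' (p + (List.count '.' r' : Int))
      rw [hlen, hc2] at key
      simp only [reduceIte]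
      have e2 : p + ((('>' :: r').count '.' : Int)) = p + (List.count '.' r' : Int) := by
        rw [hc1]
      have e3 : p + ((List.count '.' L : Int) - (List.count '.' t : Int))
          = p + (List.count '.' r' : Int) := by
        rw [hcnt, hc1]; push_cast; ring
      rw [e2, e3]
      exact key
    · by_cases hlt : c = '<'
      · subst hlt
        have hc2 : ((t ++ ['<']).count '.') = t.count '.' := by simp [List.count_append]
        have key := ih (t ++ ['<']) hL' (p + (List.count '.' t : Int))
        rw [hlen, hc2] at key
        simp only [reduceIte]
        exact key
      · by_cases hdot : c = '.'
        · subst hdot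
          have hc2 : ((t ++ ['.']).count '.') = t.count '.' + 1 := by
            simp [List.count_append]
          have key := ih (t ++ ['.']) hL' p
          rw [hlen, hc2] at key
          push_cast at key
          simp only [reduceIte]
          exact key
        · have hc2 : ((t ++ [c]).count '.') = t.count '.' := by
            simp [List.count_append, hdot]
          have key := ih (t ++ [c]) hL' p
          rw [hlen, hc2] at key
          simp only [if_neg hgt, if_neg hlt, if_neg hdot]
          exact key

-- ===== VERDICT (by name: the statement is the Claim_ definition above) =====
theorem count_photos_spec : Claim_equal_count_photos := by
  intro road _
  unfold Spec_count_photos count_photos count_photos_alt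
  simp only [PySem.Chars.slice_eq_listSlice, chars_count_singleton]
  have h := loop_eq road.toList road.toList [] rfl 0
  simpa using h
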